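-- pv_equiv track=rewrite | github.com/kilogrampaliwa/model_railroad_controller | ardu_handling/ardu_out_text.py | __konwerter_na_16
-- ===== SOURCE A (Python) =====
-- def __konwerter_na_16(tab_2):
--     """
--     Converts binary pin states into hexadecimal characters.
--     """
--     # Conversion from binary to hexadecimal
--     if (type(tab_2[0])==chr):
--         for i in range(4):
--             tab_2[i] = int(tab_2[i])
--     if tab_2 == [0,0,0,0]: return '0'
--     if tab_2 == [0,0,0,1]: return '1'
--     if tab_2 == [0,0,1,0]: return '2'
--     if tab_2 == [0,0,1,1]: return '3'
--     if tab_2 == [0,1,0,0]: return '4'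
--     if tab_2 == [0,1,0,1]: return '5'
--     if tab_2 == [0,1,1,0]: return '6'
--     if tab_2 == [0,1,1,1]: return '7'
--     if tab_2 == [1,0,0,0]: return '8'
--     if tab_2 == [1,0,0,1]: return '9'
--     if tab_2 == [1,0,1,0]: return 'A'
--     if tab_2 == [1,0,1,1]: return 'B'
--     if tab_2 == [1,1,0,0]: return 'C'
--     if tab_2 == [1,1,0,1]: return 'D'
--     if tab_2 == [1,1,1,0]: return 'E'
--     if tab_2 == [1,1,1,1]: return 'F'
-- ===== SOURCE B (Python) =====
-- def __konwerter_na_16(tab_2):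
--     # closed form: index into a hex-digit string by the 4-bit value
--     if len(tab_2) == 4 and all(x in (0, 1) for x in tab_2):
--         return "0123456789ABCDEF"[8*tab_2[0] + 4*tab_2[1] + 2*tab_2[2] + tab_2[3]]
--     return None
-- ===== Notes on version B (the rewrite author's own statement) =====
-- stated objective: simpler
-- what changed: Replaces the 16-way if-chain of list-equality tests with a closed-form computation: validate the 4-bit shape once and index a hex-digit string by 8a+4b+2c+d.
import Mathlib
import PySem

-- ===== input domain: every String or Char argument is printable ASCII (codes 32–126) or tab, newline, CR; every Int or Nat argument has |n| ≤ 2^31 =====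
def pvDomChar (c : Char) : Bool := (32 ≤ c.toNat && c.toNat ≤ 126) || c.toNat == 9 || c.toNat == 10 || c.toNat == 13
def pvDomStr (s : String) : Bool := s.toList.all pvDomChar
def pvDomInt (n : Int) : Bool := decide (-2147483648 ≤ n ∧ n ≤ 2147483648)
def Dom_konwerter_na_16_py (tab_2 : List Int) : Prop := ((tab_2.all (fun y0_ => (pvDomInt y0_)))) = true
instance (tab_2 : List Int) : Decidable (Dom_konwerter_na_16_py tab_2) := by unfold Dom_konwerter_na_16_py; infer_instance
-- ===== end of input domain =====

-- B replaces A's 16-way if-chain of list comparisons by a closed-form lookup: validate the 4-bit shape once, then index a hex-digit string by 8a+4b+2c+d; return values agree on all non-empty inputs.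


-- ===== PORT A =====
def konwerter_na_16_py (tab_2 : List Int) : Option String :=
  match PySem.List.pyGet? tab_2 0 with
  | none => none  -- IndexError on the empty list; excluded by Pre_
  | some _ =>
    -- `type(tab_2[0])==chr` is always False on ints (chr is a builtin function, never a type), so the int() loop never runs
    if tab_2 = [0,0,0,0] then some "0"
    else if tab_2 = [0,0,0,1] then some "1"
    else if tab_2 = [0,0,1,0] then some "2"
    else if tab_2 = [0,0,1,1] then some "3"
    else if tab_2 = [0,1,0,0] then some "4"
    else if tab_2 = [0,1,0,1] then some "5"
    else if tab_2 = [0,1,1,0] then some "6"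
    else if tab_2 = [0,1,1,1] then some "7"
    else if tab_2 = [1,0,0,0] then some "8"
    else if tab_2 = [1,0,0,1] then some "9"
    else if tab_2 = [1,0,1,0] then some "A"
    else if tab_2 = [1,0,1,1] then some "B"
    else if tab_2 = [1,1,0,0] then some "C"
    else if tab_2 = [1,1,0,1] then some "D"
    else if tab_2 = [1,1,1,0] then some "E"
    else if tab_2 = [1,1,1,1] then some "F"
    else none  -- implicit `return None` fall-through

-- ===== PORT B =====
def konwerter_na_16_py_alt (tab_2 : List Int) : Option String :=
  if tab_2.length = 4 ∧ (∀ x ∈ tab_2, x = 0 ∨ x = 1) then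
    -- the guard guarantees the four indices are in range, so pyGetD's default is never used
    (PySem.Str.pyGet? "0123456789ABCDEF"
      (8 * PySem.List.pyGetD tab_2 0 0 + 4 * PySem.List.pyGetD tab_2 1 0
        + 2 * PySem.List.pyGetD tab_2 2 0 + PySem.List.pyGetD tab_2 3 0)).map
      (fun c => String.ofList [c])
  else none

-- ===== PRECONDITION & SPEC =====
-- A evaluates tab_2[0] before anything else, so the empty list raises IndexError; Pre_ excludes exactly it.
def Pre_konwerter_na_16_py (tab_2 : List Int) : Prop := tab_2 ≠ []
instance (tab_2 : List Int) : Decidable (Pre_konwerter_na_16_py tab_2) := by unfold Pre_konwerter_na_16_py; infer_instance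
def pvWitness_konwerter_na_16_py : List Int := [1, 0, 1, 0]

def Spec_konwerter_na_16_py (tab_2 : List Int) (out : Option String) : Prop := out = konwerter_na_16_py_alt tab_2
instance (tab_2 : List Int) (out : Option String) : Decidable (Spec_konwerter_na_16_py tab_2 out) := by unfold Spec_konwerter_na_16_py; infer_instance

-- ===== CLAIM (what is proved, stated in full; the proofs are below) =====
def Claim_equal_konwerter_na_16_py : Prop := ∀ (tab_2 : List Int), Dom_konwerter_na_16_py tab_2 → Pre_konwerter_na_16_py tab_2 → Spec_konwerter_na_16_py tab_2 (konwerter_na_16_py tab_2)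

-- ===== LEMMAS AND PROOFS =====

-- B returns none whenever some element of a 4-list is not a bit
lemma alt_none_of_bad (a b c d : Int)
    (h : ¬(a = 0 ∨ a = 1) ∨ ¬(b = 0 ∨ b = 1) ∨ ¬(c = 0 ∨ c = 1) ∨ ¬(d = 0 ∨ d = 1)) :
    konwerter_na_16_py_alt [a, b, c, d] = none := by
  unfold konwerter_na_16_py_alt
  rw [if_neg]
  rintro ⟨-, hall⟩
  rcases h with h | h | h | h
  · exact h (hall a (by simp))
  · exact h (hall b (by simp))
  · exact h (hall c (by simp))
  · exact h (hall d (by simp))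

-- A returns none whenever some element of a 4-list is not a bit: all 16 comparisons fail
lemma a_none_of_bad (a b c d : Int)
    (h : ¬(a = 0 ∨ a = 1) ∨ ¬(b = 0 ∨ b = 1) ∨ ¬(c = 0 ∨ c = 1) ∨ ¬(d = 0 ∨ d = 1)) :
    konwerter_na_16_py [a, b, c, d] = none := by
  have h0 : ([a,b,c,d] : List Int) ≠ [0,0,0,0] := by
    intro he; simp only [List.cons.injEq, and_true] at he; omega
  have h1 : ([a,b,c,d] : List Int) ≠ [0,0,0,1] := by
    intro he; simp only [List.cons.injEq, and_true] at he; omega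
  have h2 : ([a,b,c,d] : List Int) ≠ [0,0,1,0] := by
    intro he; simp only [List.cons.injEq, and_true] at he; omega
  have h3 : ([a,b,c,d] : List Int) ≠ [0,0,1,1] := by
    intro he; simp only [List.cons.injEq, and_true] at he; omega
  have h4 : ([a,b,c,d] : List Int) ≠ [0,1,0,0] := by
    intro he; simp only [List.cons.injEq, and_true] at he; omega
  have h5 : ([a,b,c,d] : List Int) ≠ [0,1,0,1] := by
    intro he; simp only [List.cons.injEq, and_true] at he; omega
  have h6 : ([a,b,c,d] : List Int) ≠ [0,1,1,0] := by
    intro he; simp only [List.cons.injEq, and_true] at he; omega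
  have h7 : ([a,b,c,d] : List Int) ≠ [0,1,1,1] := by
    intro he; simp only [List.cons.injEq, and_true] at he; omega
  have h8 : ([a,b,c,d] : List Int) ≠ [1,0,0,0] := by
    intro he; simp only [List.cons.injEq, and_true] at he; omega
  have h9 : ([a,b,c,d] : List Int) ≠ [1,0,0,1] := by
    intro he; simp only [List.cons.injEq, and_true] at he; omega
  have h10 : ([a,b,c,d] : List Int) ≠ [1,0,1,0] := by
    intro he; simp only [List.cons.injEq, and_true] at he; omega
  have h11 : ([a,b,c,d] : List Int) ≠ [1,0,1,1] := by
    intro he; simp only [List.cons.injEq, and_true] at he; omega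
  have h12 : ([a,b,c,d] : List Int) ≠ [1,1,0,0] := by
    intro he; simp only [List.cons.injEq, and_true] at he; omega
  have h13 : ([a,b,c,d] : List Int) ≠ [1,1,0,1] := by
    intro he; simp only [List.cons.injEq, and_true] at he; omega
  have h14 : ([a,b,c,d] : List Int) ≠ [1,1,1,0] := by
    intro he; simp only [List.cons.injEq, and_true] at he; omega
  have h15 : ([a,b,c,d] : List Int) ≠ [1,1,1,1] := by
    intro he; simp only [List.cons.injEq, and_true] at he; omega
  unfold konwerter_na_16_py
  rw [PySem.List.pyGet?_zero_cons]
  rw [if_neg h0, if_neg h1, if_neg h2, if_neg h3, if_neg h4, if_neg h5, if_neg h6, if_neg h7, if_neg h8, if_neg h9, if_neg h10, if_neg h11, if_neg h12, if_neg h13, if_neg h14, if_neg h15]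

-- agreement on every 4-element list: 16 literal bit patterns by computation, the rest via the two none-lemmas
lemma equal_four (a b c d : Int) :
    konwerter_na_16_py [a, b, c, d] = konwerter_na_16_py_alt [a, b, c, d] := by
  by_cases ha : a = 0 ∨ a = 1
  · by_cases hb : b = 0 ∨ b = 1
    · by_cases hc : c = 0 ∨ c = 1
      · by_cases hd : d = 0 ∨ d = 1
        · rcases ha with ha | ha <;> rcases hb with hb | hb <;>
            rcases hc with hc | hc <;> rcases hd with hd | hd <;>
            subst ha hb hc hd <;> decide
        · rw [alt_none_of_bad a b c d (by tauto), a_none_of_bad a b c d (by tauto)]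
      · rw [alt_none_of_bad a b c d (by tauto), a_none_of_bad a b c d (by tauto)]
    · rw [alt_none_of_bad a b c d (by tauto), a_none_of_bad a b c d (by tauto)]
  · rw [alt_none_of_bad a b c d (by tauto), a_none_of_bad a b c d (by tauto)]

-- ===== VERDICT (by name: the statement is the Claim_ definition above) =====
theorem konwerter_na_16_py_spec : Claim_equal_konwerter_na_16_py := by
  intro tab_2 _ hpre
  unfold Spec_konwerter_na_16_py
  match tab_2 with
  | [] => exact absurd rfl hpre
  | [a] => simp [konwerter_na_16_py, konwerter_na_16_py_alt]
  | [a, b] => simp [konwerter_na_16_py, konwerter_na_16_py_alt]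
  | [a, b, c] => simp [konwerter_na_16_py, konwerter_na_16_py_alt]
  | [a, b, c, d] => exact equal_four a b c d
  | a :: b :: c :: d :: e :: rest =>
      simp [konwerter_na_16_py, konwerter_na_16_py_alt, PySem.List.pyGet?_zero_cons]
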